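-- pv_equiv track=rewrite | github.com/beyinsiz1903/acenta-uygulama | backend/app/services/installments.py | _distribute_cents
-- ===== SOURCE A (Python) =====
-- from typing import List
--
-- def _distribute_cents(total_cents: int, installments: int) -> List[int]:
--     """Distribute cents across installments deterministically.
--
--     Example: 100 / 3 -> [34, 33, 33]
--     We put any remainder on the first installments to keep sum stable.
--     """
--
--     base = total_cents // installments
--     remainder = total_cents % installments
--     amounts = []
--     for i in range(installments):
--         extra = 1 if i < remainder else 0
--         amounts.append(base + extra)
--     return amounts
-- ===== SOURCE B (Python) =====
-- def _distribute_cents(total_cents: int, installments: int):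
--     # Greedy: each installment takes the ceiling of what remains spread
--     # over the installments still to fill; no precomputed base/remainder.
--     amounts = []
--     remaining = total_cents
--     n = installments
--     while n > 0:
--         share = -(-remaining // n)  # ceil(remaining / n)
--         amounts.append(share)
--         remaining -= share
--         n -= 1
--     return amounts
-- ===== Notes on version B (the rewrite author's own statement) =====
-- stated objective: alternative
-- what changed: Replaces the precomputed base/remainder with a per-index threshold test by a greedy single pass that maintains the running remaining amount and assigns each installment the ceiling of remaining divided by the installments left.
import Mathlib
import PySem

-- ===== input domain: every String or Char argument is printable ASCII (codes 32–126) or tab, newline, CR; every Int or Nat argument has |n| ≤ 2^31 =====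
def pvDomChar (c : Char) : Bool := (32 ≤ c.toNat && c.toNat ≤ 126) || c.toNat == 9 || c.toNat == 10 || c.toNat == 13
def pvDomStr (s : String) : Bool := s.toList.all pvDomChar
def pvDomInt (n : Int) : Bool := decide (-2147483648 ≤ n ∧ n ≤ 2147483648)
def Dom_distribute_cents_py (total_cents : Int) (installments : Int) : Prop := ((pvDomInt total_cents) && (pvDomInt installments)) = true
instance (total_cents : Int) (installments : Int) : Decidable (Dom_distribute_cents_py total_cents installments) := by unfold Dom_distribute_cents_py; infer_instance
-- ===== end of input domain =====

-- B replaces the precomputed base/remainder + per-index test by a greedy pass that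
-- assigns each installment the ceiling of the running remaining amount over the
-- installments still to fill (alternative algorithm, same cost).

-- ===== PORT A =====
def distribute_cents_py (total_cents : Int) (installments : Int) : List Int :=
  let base := PySem.Int.floordiv total_cents installments
  let remainder := PySem.Int.mod total_cents installments
  (PySem.List.pyRange 0 installments 1).foldl
    (fun amounts i => amounts ++ [base + (if i < remainder then (1 : Int) else 0)]) []

-- ===== PORT B =====
-- the while loop of Source B: state (remaining, n, amounts)
def pvLoopB (remaining : Int) (n : Int) (amounts : List Int) : List Int :=
  if _h : 0 < n then
    let share := -(PySem.Int.floordiv (-remaining) n)  -- -(-remaining // n) = ceil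
    pvLoopB (remaining - share) (n - 1) (amounts ++ [share])
  else amounts
termination_by n.toNat
decreasing_by omega

def distribute_cents_py_alt (total_cents : Int) (installments : Int) : List Int :=
  pvLoopB total_cents installments []

-- ===== PRECONDITION & SPEC =====
-- Pre_ excludes installments = 0, where Python A raises ZeroDivisionError.
def Pre_distribute_cents_py (_total_cents : Int) (installments : Int) : Prop := installments ≠ 0
instance (total_cents : Int) (installments : Int) : Decidable (Pre_distribute_cents_py total_cents installments) := by unfold Pre_distribute_cents_py; infer_instance
def pvWitness_distribute_cents_py : Int × Int := (100, 3)

def Spec_distribute_cents_py (total_cents : Int) (installments : Int) (out : List Int) : Prop := out = distribute_cents_py_alt total_cents installments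
instance (total_cents : Int) (installments : Int) (out : List Int) : Decidable (Spec_distribute_cents_py total_cents installments out) := by unfold Spec_distribute_cents_py; infer_instance

-- ===== CLAIM =====
def Claim_equal_distribute_cents_py : Prop := ∀ (total_cents : Int) (installments : Int), Dom_distribute_cents_py total_cents installments → Pre_distribute_cents_py total_cents installments → Spec_distribute_cents_py total_cents installments (distribute_cents_py total_cents installments)

-- ===== LEMMAS AND PROOFS =====

-- A's loop produces a threshold map over the range; that map is two replicate blocks.
theorem pv_blocks (base : Int) : ∀ (n r : Nat), r ≤ n →
    (List.range n).map (fun (k : Nat) => base + if (k : Int) < (r : Int) then (1 : Int) else 0)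
      = List.replicate r (base + 1) ++ List.replicate (n - r) base := by
  intro n
  induction n with
  | zero => intro r hr; interval_cases r; simp
  | succ m ih =>
    intro r hr
    rw [List.range_succ, List.map_append]
    by_cases h : r ≤ m
    · rw [ih r h]
      have : ¬ ((m : Int) < (r : Int)) := by exact_mod_cast not_lt.mpr h
      simp only [List.map_cons, List.map_nil, if_neg this]
      have h2 : m + 1 - r = (m - r) + 1 := by omega
      rw [h2, List.replicate_succ']
      simp
    · have hr' : r = m + 1 := by omega
      subst hr'
      have hcong : (List.range m).map (fun (k : Nat) => base + if (k : Int) < ((m+1 : Nat) : Int) then (1 : Int) else 0)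
          = (List.range m).map (fun (_ : Nat) => base + 1) := by
        apply List.map_congr_left
        intro k hk
        have hklt : (k : Int) < ((m+1 : Nat) : Int) := by
          have := List.mem_range.mp hk; exact_mod_cast Nat.lt_succ_of_lt this
        rw [if_pos hklt]
      have hm : ((m : Int)) < ((m+1 : Nat) : Int) := by exact_mod_cast Nat.lt_succ_self m
      simp only [List.map_cons, List.map_nil, if_pos hm]
      rw [hcong, List.map_const', List.length_range]
      simp [List.replicate_succ']

-- A equals the two-block form for n > 0
theorem pv_A_blocks (t n : Int) (hpos : 0 < n) :
    distribute_cents_py t n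
      = List.replicate (PySem.Int.mod t n).toNat (PySem.Int.floordiv t n + 1)
        ++ List.replicate (n - PySem.Int.mod t n).toNat (PySem.Int.floordiv t n) := by
  unfold distribute_cents_py
  set base := PySem.Int.floordiv t n with hbase
  set r := PySem.Int.mod t n with hr
  have h0 : 0 ≤ r := PySem.Int.mod_nonneg t hpos
  have h1 : r < n := PySem.Int.mod_lt t hpos
  rw [PySem.List.foldl_append_singleton_eq_map, List.nil_append, PySem.List.pyRange_one]
  have hcomp : (List.range (n - 0).toNat).map ((fun i => base + if i < r then (1:Int) else 0) ∘ (fun k : Nat => (0 : Int) + (k : Int)))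
      = (List.range (n - 0).toNat).map (fun (k : Nat) => base + if (k : Int) < ((r.toNat : Nat) : Int) then (1:Int) else 0) := by
    apply List.map_congr_left
    intro k _
    simp [Int.toNat_of_nonneg h0]
  rw [List.map_map, hcomp, pv_blocks base (n - 0).toNat r.toNat (by omega)]
  have hnr : (n - 0).toNat - r.toNat = (n - r).toNat := by omega
  rw [hnr]

-- B's loop produces the same two blocks, by induction on the count.
theorem pv_loop_eq : ∀ (k : Nat) (rem n : Int) (acc : List Int), n = (k : Int) → 0 < n →
    pvLoopB rem n acc
      = acc ++ List.replicate (PySem.Int.mod rem n).toNat (PySem.Int.floordiv rem n + 1)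
            ++ List.replicate (n - PySem.Int.mod rem n).toNat (PySem.Int.floordiv rem n) := by
  intro k
  induction k with
  | zero => intro rem n acc hk hpos; omega
  | succ m ih =>
    intro rem n acc hk hpos
    set b := PySem.Int.floordiv rem n with hb
    set r := PySem.Int.mod rem n with hr
    have hrep : b * n + r = rem := by
      have := PySem.Int.floordiv_mul_add_mod rem n; omega
    have h0 : 0 ≤ r := PySem.Int.mod_nonneg rem hpos
    have h1 : r < n := PySem.Int.mod_lt rem hpos
    rw [pvLoopB]
    rw [dif_pos hpos]
    by_cases hr0 : r = 0
    · -- share = b; remaining' = b*(n-1)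
      have hshare : -(PySem.Int.floordiv (-rem) n) = b := by
        rw [PySem.Int.neg_floordiv_neg_eq_iff_of_pos hpos]
        constructor <;> nlinarith
      rw [hshare]
      by_cases hn1 : n = 1
      · subst hn1
        rw [pvLoopB]
        simp [hr0]
      · have hpos' : 0 < n - 1 := by omega
        have hrec : rem - b = b * (n - 1) := by rw [← hrep]; ring_nf; omega
        have hb' : PySem.Int.floordiv (rem - b) (n - 1) = b := by
          rw [PySem.Int.floordiv_eq_iff_of_pos hpos']
          constructor <;> nlinarith [hrec]
        have hr' : PySem.Int.mod (rem - b) (n - 1) = 0 := by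
          have := PySem.Int.floordiv_mul_add_mod (rem - b) (n - 1)
          rw [hb'] at this; omega
        rw [ih (rem - b) (n - 1) (acc ++ [b]) (by omega) hpos', hb', hr']
        have : (n - 1 - 0).toNat = (n - 1).toNat := by omega
        simp only [hr0, this]
        have hz : Int.toNat 0 = 0 := rfl
        simp only [hz, List.replicate_zero, List.nil_append, List.append_assoc,
          List.singleton_append, List.append_cancel_left_eq]
        rw [show (n - 0).toNat = (n - 1).toNat + 1 from by omega, List.replicate_succ]
    · -- r > 0 : share = b + 1; remaining' = b*(n-1) + (r-1)
      have hrpos : 0 < r := by omega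
      have hn2 : 1 < n := by omega
      have hpos' : 0 < n - 1 := by omega
      have hshare : -(PySem.Int.floordiv (-rem) n) = b + 1 := by
        rw [PySem.Int.neg_floordiv_neg_eq_iff_of_pos hpos]
        constructor <;> nlinarith
      rw [hshare]
      have hb' : PySem.Int.floordiv (rem - (b + 1)) (n - 1) = b := by
        rw [PySem.Int.floordiv_eq_iff_of_pos hpos']
        constructor <;> nlinarith
      have hr' : PySem.Int.mod (rem - (b + 1)) (n - 1) = r - 1 := by
        have h3 := PySem.Int.floordiv_mul_add_mod (rem - (b + 1)) (n - 1)
        rw [hb'] at h3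
        have hmul : b * n = b * (n - 1) + b := by ring
        omega
      rw [ih (rem - (b + 1)) (n - 1) (acc ++ [b + 1]) (by omega) hpos', hb', hr']
      have e1 : r.toNat = (r - 1).toNat + 1 := by omega
      have e2 : (n - 1 - (r - 1)).toNat = (n - r).toNat := by omega
      rw [e1, e2, List.replicate_succ]
      simp

theorem pv_spec_aux (t n : Int) (hn : n ≠ 0) :
    distribute_cents_py t n = distribute_cents_py_alt t n := by
  rcases lt_or_gt_of_ne hn with hneg | hpos
  · -- n < 0 : A's range is empty; B's loop exits immediately
    unfold distribute_cents_py distribute_cents_py_alt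
    rw [PySem.List.pyRange_one_eq_nil (by omega), pvLoopB, dif_neg (by omega)]
    simp
  · rw [pv_A_blocks t n hpos]
    unfold distribute_cents_py_alt
    rw [pv_loop_eq n.toNat t n [] (by omega) hpos]
    simp

-- ===== VERDICT =====
theorem distribute_cents_py_spec : Claim_equal_distribute_cents_py := by
  intro t n _ hpre
  exact pv_spec_aux t n hpre
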